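-- pv_equiv track=rewrite | github.com/ShravyaKadur/search-engine-using-ir | Indexer/test/main.py | deltaDecode
-- ===== SOURCE A (Python) =====
-- def deltaDecode(dInvertedIndex):
-- 	invertedIndex = {}
-- 	for word in dInvertedIndex:
-- 		invertedIndex[word] = []
-- 		prevDocId = 0
-- 		array = dInvertedIndex[word]
-- 		i = 0
--
-- 		while i < len(array):
-- 			deltaDocId = array[i]
-- 			size = int(array[i+1])
-- 			positions = array[i+2:i+2+size]
-- 			docId = deltaDocId + prevDocId
-- 			invertedIndex[word].extend([docId, size])
-- 			invertedIndex[word].extend(positions)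
-- 			prevDocId += deltaDocId
-- 			i += size + 2
--
-- 	return invertedIndex
-- ===== SOURCE B (Python) =====
-- def deltaDecode(dInvertedIndex):
--     invertedIndex = {}
--     for word, array in dInvertedIndex.items():
--         # pass 1: parse raw segment records, consuming the array from the front
--         segments = []
--         rest = array
--         while rest:
--             size = int(rest[1])
--             segments.append((rest[0], size, rest[2:2 + size]))
--             rest = rest[2 + size:]
--         # pass 2: prefix sums of the raw deltas give the absolute docIds
--         docIds = []
--         total = 0
--         for delta, _, _ in segments:
--             total += delta
--             docIds.append(total)
--         # pass 3: flatten each record as [docId, size, *positions]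
--         invertedIndex[word] = [
--             value
--             for docId, (_, size, positions) in zip(docIds, segments)
--             for value in (docId, size, *positions)
--         ]
--     return invertedIndex
-- ===== Notes on version B (the rewrite author's own statement) =====
-- stated objective: alternative
-- what changed: Replaces the fused index-walking while-loop with a running prevDocId by three explicit passes per word: parse the array into segment records by consuming it from the front, compute the prefix sums of the raw deltas, then flatten each record as [docId, size, *positions].
-- outside the precondition, e.g. on deltaDecode({'a': [0, -3, 5]}): A returns {'a': [0, -3, 5, 0, 2, 5]}, B raises IndexError
import Mathlib
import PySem

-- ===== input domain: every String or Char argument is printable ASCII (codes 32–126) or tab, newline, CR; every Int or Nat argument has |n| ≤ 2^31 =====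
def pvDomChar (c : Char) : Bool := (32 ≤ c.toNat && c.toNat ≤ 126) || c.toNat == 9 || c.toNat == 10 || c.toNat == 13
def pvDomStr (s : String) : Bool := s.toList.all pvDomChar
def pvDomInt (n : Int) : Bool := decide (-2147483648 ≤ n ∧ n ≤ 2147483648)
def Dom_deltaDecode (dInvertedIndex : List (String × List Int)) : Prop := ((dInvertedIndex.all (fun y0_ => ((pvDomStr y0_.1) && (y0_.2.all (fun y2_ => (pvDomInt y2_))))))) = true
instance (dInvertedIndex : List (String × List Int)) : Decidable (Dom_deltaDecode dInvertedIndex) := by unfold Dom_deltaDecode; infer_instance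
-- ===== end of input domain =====

-- B replaces A's fused index-walking loop (running prevDocId) by three per-word passes
-- (parse segment records, prefix-sum the deltas, flatten); alternative decomposition, same cost.


-- ===== PORT A =====
-- A's while-loop over the absolute index i, with fuel (inside Pre_ each iteration advances i by
-- ≥ 1, so fuel = array.length suffices; outside Pre_ Python raises or diverges, nothing claimed)
def decodeLoopA (array : List Int) (fuel : Nat) (i prev : Int) (acc : List Int) : List Int :=
  match fuel with
  | 0 => acc
  | fuel + 1 =>
    if i < PySem.List.len array then
      match PySem.List.pyGet? array i, PySem.List.pyGet? array (i+1) with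
      | some d, some s =>
          decodeLoopA array fuel (i + (s + 2)) (prev + d)
            ((acc ++ [d + prev, s]) ++ PySem.List.slice array (some (i+2)) (some (i+2+s)))
      | _, _ => acc  -- IndexError in Python (outside Pre_)
    else acc

def deltaDecode (dInvertedIndex : List (String × List Int)) : List (String × List Int) :=
  (dInvertedIndex.foldl
    (fun inv p =>
      PySem.Dict.insert inv p.1
        (decodeLoopA (PySem.Dict.getD (PySem.Dict.mk dInvertedIndex) p.1 [])
          (PySem.Dict.getD (PySem.Dict.mk dInvertedIndex) p.1 []).length 0 0 []))
    PySem.Dict.empty).items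

-- ===== PORT B =====
-- pass 1: parse segment records (delta, size, positions), consuming the array from the front
def parseSegs (rest : List Int) (fuel : Nat) : List (Int × Int × List Int) :=
  match fuel with
  | 0 => []
  | fuel + 1 =>
    match rest with
    | [] => []
    | d :: t =>
      match PySem.List.pyGet? (d :: t) 1 with
      | none => []  -- IndexError in Python (outside Pre_)
      | some s =>
          (d, s, PySem.List.slice (d :: t) (some 2) (some (2 + s))) ::
            parseSegs (PySem.List.slice (d :: t) (some (2 + s)) none) fuel

-- pass 2: prefix sums of the raw deltas give the absolute docIds
def prefixDocIds (segs : List (Int × Int × List Int)) : List Int :=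
  (segs.foldl (fun (st : Int × List Int) seg => (st.1 + seg.1, st.2 ++ [st.1 + seg.1])) (0, [])).2

-- pass 3: flatten each record as [docId, size, *positions]
def flattenSegs (docIds : List Int) (segs : List (Int × Int × List Int)) : List Int :=
  (docIds.zip segs).flatMap (fun p => p.1 :: p.2.2.1 :: p.2.2.2)

def deltaDecode_alt (dInvertedIndex : List (String × List Int)) : List (String × List Int) :=
  (dInvertedIndex.foldl
    (fun inv p =>
      let segs := parseSegs p.2 p.2.length
      PySem.Dict.insert inv p.1 (flattenSegs (prefixDocIds segs) segs))
    PySem.Dict.empty).items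

-- ===== PRECONDITION & SPEC =====
-- shape grammar of a well-formed segment stream, read left to right: empty, or a record
-- [delta, size, positions...] with size ≥ 0 owning the next size cells, or size = -1, in which
-- case the stream continues at the size cell itself (i += size + 2, i.e. rest = rest[1:]).
-- The Nat argument is only a structural-recursion bound (the list length); it never changes the value.
def validGo : Nat → List Int → Bool
  | 0, l => l.isEmpty
  | _ + 1, [] => true
  | _ + 1, [_] => false
  | fuel + 1, _ :: s :: t =>
      if s = -1 then validGo fuel (s :: t)
      else if 0 ≤ s then validGo fuel (t.drop s.toNat) else false

def validArr (l : List Int) : Bool := validGo l.length l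

-- Pre_ excludes duplicate keys (the assoc-list/Python-dict correspondence collapses them) and
-- arrays that are not a well-formed segment stream, on which A raises IndexError, diverges, or
-- returns values produced by negative-index wraparound of i, while B raises IndexError.
def Pre_deltaDecode (dInvertedIndex : List (String × List Int)) : Prop :=
  (dInvertedIndex.map Prod.fst).Nodup ∧ ∀ p ∈ dInvertedIndex, validArr p.2 = true

instance (dInvertedIndex : List (String × List Int)) : Decidable (Pre_deltaDecode dInvertedIndex) := by
  unfold Pre_deltaDecode; infer_instance

def pvWitness_deltaDecode : (List (String × List Int)) :=
  [("a", [3, 2, 1, 5, 2, 1, 7]), ("b", [])]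

def Spec_deltaDecode (dInvertedIndex : List (String × List Int)) (out : List (String × List Int)) : Prop := out = deltaDecode_alt dInvertedIndex
instance (dInvertedIndex : List (String × List Int)) (out : List (String × List Int)) : Decidable (Spec_deltaDecode dInvertedIndex out) := by unfold Spec_deltaDecode; infer_instance

-- ===== CLAIM (what is proved, stated in full; the proofs are below) =====
def Claim_equal_deltaDecode : Prop := ∀ (dInvertedIndex : List (String × List Int)), Dom_deltaDecode dInvertedIndex → Pre_deltaDecode dInvertedIndex → Spec_deltaDecode dInvertedIndex (deltaDecode dInvertedIndex)

-- ===== LEMMAS AND PROOFS =====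

-- reference flattening with a running prefix (proof-only)
def emit (prev : Int) : List (Int × Int × List Int) → List Int
  | [] => []
  | (d, s, p) :: rest => (prev + d) :: s :: (p ++ emit (prev + d) rest)

-- prefix sums with arbitrary start
def scanDelta (t : Int) : List (Int × Int × List Int) → List Int
  | [] => []
  | (d, _, _) :: r => (t + d) :: scanDelta (t + d) r

lemma prefixDocIds_foldl (segs : List (Int × Int × List Int)) :
    ∀ (t : Int) (acc : List Int),
      (segs.foldl (fun (st : Int × List Int) seg => (st.1 + seg.1, st.2 ++ [st.1 + seg.1])) (t, acc)).2
        = acc ++ scanDelta t segs := by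
  induction segs with
  | nil => intro t acc; simp [scanDelta]
  | cons seg rest ih =>
      intro t acc
      obtain ⟨d, s, p⟩ := seg
      simp [List.foldl_cons, ih, scanDelta]

lemma flatten_scan (segs : List (Int × Int × List Int)) :
    ∀ (t : Int), flattenSegs (scanDelta t segs) segs = emit t segs := by
  induction segs with
  | nil => intro t; simp [scanDelta, flattenSegs, emit]
  | cons seg rest ih =>
      intro t
      obtain ⟨d, s, p⟩ := seg
      simp [scanDelta, flattenSegs, emit] at *
      exact ih (t + d)

lemma b_passes (segs : List (Int × Int × List Int)) :
    flattenSegs (prefixDocIds segs) segs = emit 0 segs := by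
  unfold prefixDocIds
  rw [prefixDocIds_foldl segs 0 []]
  simpa using flatten_scan segs 0

lemma validGo_fuel : ∀ (fuel fuel' : Nat) (l : List Int),
    l.length ≤ fuel → l.length ≤ fuel' → validGo fuel l = validGo fuel' l := by
  intro fuel
  induction fuel with
  | zero =>
      intro fuel' l hl _
      have : l = [] := by cases l <;> simp_all
      subst this; cases fuel' <;> simp [validGo]
  | succ fuel ih =>
      intro fuel' l hl hl'
      cases l with
      | nil => cases fuel' <;> simp [validGo]
      | cons d t =>
          cases t with
          | nil =>
              cases fuel' with
              | zero => simp at hl'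
              | succ fuel' => simp [validGo]
          | cons s t' =>
              cases fuel' with
              | zero => simp at hl'
              | succ fuel' =>
                  simp only [validGo]
                  split_ifs
                  · exact ih fuel' (s :: t') (by simp at hl ⊢; omega) (by simp at hl' ⊢; omega)
                  · exact ih fuel' (t'.drop s.toNat)
                      (by simp at hl ⊢; omega) (by simp at hl' ⊢; omega)
                  · rfl

lemma valid_cons (d : Int) (t : List Int) (h : validArr (d :: t) = true) :
    ∃ s t', t = s :: t' ∧ -1 ≤ s ∧ validArr ((d :: t).drop (2 + s).toNat) = true := by
  cases t with
  | nil => simp [validArr, validGo] at h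
  | cons s t' =>
      rw [validArr] at h
      rw [show (d :: s :: t').length = t'.length + 1 + 1 by simp] at h
      rw [validGo] at h
      refine ⟨s, t', rfl, ?_, ?_⟩ <;> split_ifs at h with h1 h2
      · omega
      · omega
      · subst h1
        have hX : (d :: (-1 : Int) :: t').drop ((2 : Int) + -1).toNat = (-1 : Int) :: t' := by
          rw [show ((2 : Int) + -1).toNat = 1 by norm_num]
          rfl
        rw [validArr, hX,
            validGo_fuel ((-1 : Int) :: t').length (t'.length + 1) _ (Nat.le_refl _) (by simp)]
        exact h
      · have h3 : (2 + s).toNat = s.toNat + 2 := by omega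
        have hX : (d :: s :: t').drop (2 + s).toNat = t'.drop s.toNat := by
          rw [h3]; rfl
        rw [validArr, hX,
            validGo_fuel (t'.drop s.toNat).length (t'.length + 1) _ (Nat.le_refl _)
              (by simp only [List.length_drop]; omega)]
        exact h

lemma drop_valid_len (d : Int) (t : List Int) (s : Int) (hs : -1 ≤ s) :
    ((d :: t).drop (2 + s).toNat).length < (d :: t).length := by
  simp; omega

lemma parseSegs_nil (fuel : Nat) : parseSegs [] fuel = [] := by
  cases fuel <;> simp [parseSegs]

lemma parseSegs_cons (d s : Int) (t' : List Int) (fuel : Nat) (hs : -1 ≤ s) :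
    parseSegs (d :: s :: t') (fuel + 1)
      = (d, s, PySem.List.slice (d :: s :: t') (some 2) (some (2 + s))) ::
          parseSegs ((d :: s :: t').drop (2 + s).toNat) fuel := by
  have h2 : PySem.List.slice (d :: s :: t') (some (2 + s)) none = (d :: s :: t').drop (2 + s).toNat :=
    PySem.List.slice_from _ (by omega)
  simp [parseSegs, PySem.List.pyGet?, PySem.List.pyIdx?, h2]

lemma parseSegs_fuel : ∀ (fuel fuel' : Nat) (rest : List Int),
    validArr rest = true → rest.length ≤ fuel → rest.length ≤ fuel' →
    parseSegs rest fuel = parseSegs rest fuel' := by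
  intro fuel
  induction fuel with
  | zero =>
      intro fuel' rest _ h _
      have : rest = [] := by cases rest <;> simp_all
      subst this; simp [parseSegs_nil]
  | succ fuel ih =>
      intro fuel' rest hv hl hl'
      cases rest with
      | nil => simp [parseSegs_nil]
      | cons d t =>
          obtain ⟨s, t', rfl, hs, hv'⟩ := valid_cons d t hv
          cases fuel' with
          | zero => simp at hl'
          | succ fuel' =>
              rw [parseSegs_cons _ _ _ _ hs, parseSegs_cons _ _ _ _ hs]
              congr 1
              have hlt := drop_valid_len d (s :: t') s hs
              exact ih fuel' _ hv' (by simp at hlt hl ⊢; omega) (by simp at hlt hl' ⊢; omega)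

-- core per-array lemma: A's indexed loop equals emit over the parsed drop-suffix
lemma loopA_eq : ∀ (fuel : Nat) (array : List Int) (i prev : Int) (acc : List Int),
    0 ≤ i → validArr (array.drop i.toNat) = true → (array.drop i.toNat).length ≤ fuel →
    decodeLoopA array fuel i prev acc
      = acc ++ emit prev (parseSegs (array.drop i.toNat) (array.drop i.toNat).length) := by
  intro fuel
  induction fuel with
  | zero =>
      intro array i prev acc hi hv hl
      have hnil : array.drop i.toNat = [] := by
        cases h : array.drop i.toNat with
        | nil => rfl
        | cons a b => rw [h] at hl; simp at hl
      simp [decodeLoopA, hnil, parseSegs_nil, emit]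
  | succ fuel ih =>
      intro array i prev acc hi hv hl
      cases hrest : array.drop i.toNat with
      | nil =>
          have hge : array.length ≤ i.toNat := List.drop_eq_nil_iff.mp hrest
          have hcond : ¬ i < PySem.List.len array := by
            rw [PySem.List.len_eq]; omega
          simp only [decodeLoopA]
          rw [if_neg hcond, parseSegs_nil]
          simp [emit]
      | cons d t =>
          rw [hrest] at hv
          obtain ⟨s, t', rfl, hs, hv'⟩ := valid_cons d t hv
          have hlen : i.toNat < array.length := by
            by_contra hc
            rw [List.drop_eq_nil_iff.mpr (by omega)] at hrest
            simp at hrest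
          have hcond : i < PySem.List.len array := by
            rw [PySem.List.len_eq]; omega
          have hget0 : PySem.List.pyGet? array i = some d := by
            rw [PySem.List.pyGet?_of_nonneg _ hi]
            have h0 := congrArg (fun l : List Int => l[0]?) hrest
            simpa [List.getElem?_drop] using h0
          have hget1 : PySem.List.pyGet? array (i+1) = some s := by
            rw [PySem.List.pyGet?_of_nonneg _ (by omega)]
            have h1 : (i+1).toNat = i.toNat + 1 := by omega
            have h0 := congrArg (fun l : List Int => l[1]?) hrest
            rw [h1]
            simpa [List.getElem?_drop] using h0
          have hdrop2 : array.drop (i.toNat + 2) = t' := by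
            have h0 := congrArg (List.drop 2) hrest
            simpa [List.drop_drop] using h0
          have hslice : PySem.List.slice array (some (i+2)) (some (i+2+s))
              = PySem.List.slice (d :: s :: t') (some 2) (some (2 + s)) := by
            rw [PySem.List.slice_toNat _ (by omega) (by omega),
                PySem.List.slice_toNat _ (by omega) (by omega)]
            rw [show (i+2).toNat = i.toNat + 2 by omega, hdrop2]
            rw [show ((2:Int)).toNat = 2 by rfl]
            rw [show (i+2+s).toNat - (i.toNat + 2) = (2+s).toNat - 2 by omega]
            rfl
          have hdrop' : array.drop ((i + (s+2)).toNat) = (d :: s :: t').drop (2+s).toNat := by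
            have h0 := congrArg (List.drop (2+s).toNat) hrest
            rw [show (i + (s+2)).toNat = i.toNat + (2+s).toNat by omega]
            simpa [List.drop_drop] using h0
          have hlt : ((d :: s :: t').drop (2+s).toNat).length < (d :: s :: t').length :=
            drop_valid_len d (s :: t') s hs
          have hstep := ih array (i + (s+2)) (prev + d)
              ((acc ++ [d + prev, s]) ++ PySem.List.slice array (some (i+2)) (some (i+2+s)))
              (by omega) (by rw [hdrop']; exact hv')
              (by rw [hdrop']; rw [hrest] at hl; omega)
          rw [decodeLoopA]
          simp only [hcond, if_true, hget0, hget1]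
          rw [hstep, hdrop']
          have hlen' : (d :: s :: t').length = (t'.length + 1) + 1 := by simp
          conv_rhs => rw [hlen', parseSegs_cons _ _ _ _ hs]
          rw [parseSegs_fuel ((d :: s :: t').drop (2+s).toNat).length (t'.length + 1) _ hv'
              (le_refl _) (by simp at hlt ⊢; omega)]
          simp [emit, hslice, Int.add_comm d prev]

lemma getD_mk_of_mem (l : List (String × List Int)) (p : String × List Int)
    (hnd : (l.map Prod.fst).Nodup) (hp : p ∈ l) :
    PySem.Dict.getD (PySem.Dict.mk l) p.1 [] = p.2 := by
  apply PySem.Dict.getD_of_mem_items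
  · show (p.1, p.2) ∈ l
    simpa using hp
  · simpa [PySem.Dict.keys] using hnd

-- ===== VERDICT (by name: the statement is the Claim_ definition above) =====
theorem deltaDecode_spec : Claim_equal_deltaDecode := by
  intro l _ hpre
  obtain ⟨hnd, hval⟩ := hpre
  unfold Spec_deltaDecode deltaDecode deltaDecode_alt
  apply congrArg PySem.Dict.items
  apply PySem.List.foldl_congr_mem
  intro acc p hp
  rw [getD_mk_of_mem l p hnd hp]
  have hv := hval p hp
  have hA := loopA_eq p.2.length p.2 0 0 [] (le_refl 0) (by simpa using hv) (by simp)
  simp only [Int.toNat_zero, List.drop_zero] at hA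
  simp only [hA, b_passes, List.nil_append]
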